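-- pv_equiv track=rewrite | github.com/mugattarova/AdventofCode2023 | d11/d11_1.py | expand_universe_columns
-- ===== SOURCE A (Python) =====
-- def expand_universe_columns(input: list) -> list:
--     j=0
--     while j < len(input[0]):
--         galaxy_found=False
--         for line in input:
--             if line[j] == "#":
--                 galaxy_found=True
--                 break
--         if not galaxy_found:
--             for line in input:
--                 line[j] = " "
--         j+=1
--     return input
-- ===== SOURCE B (Python) =====
-- def expand_universe_columns(input: list) -> list:
--     # One row-major pass over the data itself builds the set of occupied
--     # (galaxy-bearing) columns; a second pass blanks every column not in it.
--     # No per-column scanning: the inner column search of the naive version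
--     # disappears into a set built while walking each row once.
--     occupied = set()
--     for line in input:
--         for j, ch in enumerate(line):
--             if ch == "#":
--                 occupied.add(j)
--     width = len(input[0])
--     for line in input:
--         for j in range(width):
--             if j not in occupied:
--                 line[j] = " "
--     return input
-- ===== Notes on version B (the rewrite author's own statement) =====
-- stated objective: alternative
-- what changed: B replaces A's column-major search (for each column, scan rows looking for '#', then maybe blank that column) by one row-major pass over the rows themselves that accumulates the set of occupied column indices via enumerate, followed by a single blanking pass over columns absent from that set; no column is ever searched.
-- outside the precondition, e.g. on expand_universe_columns([['.', '#'], ['#']]): A returns [['.', '#'], ['#']], B returns [['.', '#'], ['#']]; on expand_universe_columns([['.', '.'], ['.']]): A raises IndexError, B raises IndexError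
import Mathlib
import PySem

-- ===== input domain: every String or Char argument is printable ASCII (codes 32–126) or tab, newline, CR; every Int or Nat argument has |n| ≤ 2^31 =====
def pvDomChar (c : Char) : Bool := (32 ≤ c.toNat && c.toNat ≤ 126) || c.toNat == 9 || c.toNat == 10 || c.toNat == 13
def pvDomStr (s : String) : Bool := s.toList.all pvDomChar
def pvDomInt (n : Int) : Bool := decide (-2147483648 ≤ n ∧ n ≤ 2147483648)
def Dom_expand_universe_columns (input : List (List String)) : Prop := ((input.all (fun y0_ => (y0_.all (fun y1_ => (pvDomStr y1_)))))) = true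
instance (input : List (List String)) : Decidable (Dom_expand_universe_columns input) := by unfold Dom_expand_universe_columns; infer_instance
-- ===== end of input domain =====

-- B builds the set of occupied column indices in one row-major pass (enumerate + set),
-- then blanks the columns not in it; A searches each column for '#'. Both Pythons mutate
-- the rows in place and return the same list object — the equivalence proved here is
-- about the returned value.

-- ===== PORT A =====
-- 'for line in input: if line[j] == "#": found = True; break'
def pvAFound (rows : List (List String)) (j : Nat) : Bool :=
  match rows with
  | [] => false
  | r :: rs => if PySem.List.pyGetD r (j : Int) "" == "#" then true else pvAFound rs j

-- 'for line in input: line[j] = " "'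
def pvABlank (rows : List (List String)) (j : Nat) : List (List String) :=
  rows.map (fun r => PySem.List.pySetD r (j : Int) " ")

-- the while loop; blanking preserves row lengths, so len(input[0]) iterations suffice as fuel
def pvALoop (rows : List (List String)) (j fuel : Nat) : List (List String) :=
  match fuel with
  | 0 => rows
  | fuel + 1 =>
    if j < (rows.headD []).length then
      pvALoop (if pvAFound rows j then rows else pvABlank rows j) (j + 1) fuel
    else rows

def expand_universe_columns (input : List (List String)) : List (List String) :=
  pvALoop input 0 (input.headD []).length

-- ===== PORT B =====
-- 'for line in input: for j, ch in enumerate(line): if ch == "#": occupied.add(j)'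
def pvBOccupied (input : List (List String)) : PySem.Set Int :=
  input.foldl
    (fun s line =>
      (PySem.List.enumerate line).foldl
        (fun s p => if p.2 == "#" then PySem.Set.add s p.1 else s) s)
    PySem.Set.empty

-- 'for j in range(width): if j not in occupied: line[j] = " "'
def pvBBlankRow (occupied : PySem.Set Int) (width : Nat) (line : List String) : List String :=
  (PySem.List.pyRange 0 (width : Int) 1).foldl
    (fun l j => if !(PySem.Set.contains occupied j) then PySem.List.pySetD l j " " else l) line

def expand_universe_columns_alt (input : List (List String)) : List (List String) :=
  let occupied := pvBOccupied input
  let width := (input.headD []).length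
  input.map (pvBBlankRow occupied width)

-- ===== PRECONDITION & SPEC =====
-- Pre_ excludes the empty grid (input[0] raises IndexError) and jagged grids with a row
-- shorter than the first row: there A normally raises IndexError at line[j] while scanning
-- or blanking a column; on the jagged grids where an early '#'-break lets A return, it
-- returns its input unchanged (every column was judged occupied) and B agrees, but that
-- agreement hangs on A's accidental scan order, so the claim is stated for rectangular-or-wider grids.
def Pre_expand_universe_columns (input : List (List String)) : Prop :=
  input ≠ [] ∧ ∀ r ∈ input, (input.headD []).length ≤ r.length
instance (input : List (List String)) : Decidable (Pre_expand_universe_columns input) := by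
  unfold Pre_expand_universe_columns; infer_instance

def pvWitness_expand_universe_columns : List (List String) :=
  [["#", "."], [".", "."]]

def Spec_expand_universe_columns (input : List (List String)) (out : List (List String)) : Prop := out = expand_universe_columns_alt input
instance (input : List (List String)) (out : List (List String)) : Decidable (Spec_expand_universe_columns input out) := by unfold Spec_expand_universe_columns; infer_instance

-- ===== CLAIM (what is proved, stated in full; the proofs are below) =====
def Claim_equal_expand_universe_columns : Prop := ∀ (input : List (List String)), Dom_expand_universe_columns input → Pre_expand_universe_columns input → Spec_expand_universe_columns input (expand_universe_columns input)

-- ===== LEMMAS AND PROOFS =====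

-- 'column j of input contains a galaxy'
def pvColHas (input : List (List String)) (j : Nat) : Bool :=
  input.any (fun r => PySem.List.pyGetD r (j : Int) "" == "#")

-- blank the positions in S of one row
def pvBlankRow (S : List Nat) (r : List String) : List String :=
  S.foldl (fun l (j : Nat) => PySem.List.pySetD l (j : Int) " ") r

lemma pvBlankRow_nil (r : List String) : pvBlankRow [] r = r := rfl

lemma pvBlankRow_cons (s : Nat) (S : List Nat) (r : List String) :
    pvBlankRow (s :: S) r = pvBlankRow S (r.set s " ") := by
  simp [pvBlankRow]

lemma pvBlankRow_append_singleton (S : List Nat) (j : Nat) (r : List String) :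
    pvBlankRow (S ++ [j]) r = (pvBlankRow S r).set j " " := by
  simp [pvBlankRow, List.foldl_append]

lemma length_pvBlankRow (S : List Nat) (r : List String) :
    (pvBlankRow S r).length = r.length := by
  induction S generalizing r with
  | nil => rfl
  | cons s S ih => rw [pvBlankRow_cons, ih, List.length_set]

lemma getElem?_pvBlankRow (S : List Nat) (j : Nat) (r : List String)
    (h : ∀ s ∈ S, s ≠ j) :
    (pvBlankRow S r)[j]? = r[j]? := by
  induction S generalizing r with
  | nil => rfl
  | cons s S ih =>
    rw [pvBlankRow_cons, ih _ (fun x hx => h x (List.mem_cons_of_mem _ hx)),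
      List.getElem?_set_ne (h s (List.mem_cons_self ..))]

lemma pvAFound_eq_any (rows : List (List String)) (j : Nat) :
    pvAFound rows j = rows.any (fun r => PySem.List.pyGetD r (j : Int) "" == "#") := by
  induction rows with
  | nil => rfl
  | cons r rs ih =>
    rw [pvAFound, ih, List.any_cons]
    by_cases h : PySem.List.pyGetD r (j : Int) "" == "#"
    · rw [if_pos h, h, Bool.true_or]
    · rw [Bool.not_eq_true] at h
      rw [if_neg (by rw [h]; exact Bool.false_ne_true), h, Bool.false_or]

lemma pvAFound_blank (input : List (List String)) (S : List Nat) (j : Nat)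
    (hS : ∀ s ∈ S, s ≠ j) :
    pvAFound (input.map (pvBlankRow S)) j = pvColHas input j := by
  rw [pvAFound_eq_any, List.any_map, pvColHas]
  congr 1
  funext r
  simp only [Function.comp, PySem.List.pyGetD_natCast, List.getD_eq_getElem?_getD,
    getElem?_pvBlankRow S j r hS]

lemma pvEmptyFilter_mem_ne (input : List (List String)) (j s : Nat)
    (hs : s ∈ (List.range j).filter (fun p => !pvColHas input p)) : s ≠ j := by
  have := List.mem_range.mp (List.mem_of_mem_filter hs)
  omega

-- A's loop computes: blank every '#'-free column of the first row's width
lemma pvKey (r0 : List String) (rest : List (List String)) :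
    ∀ (fuel j : Nat), j + fuel = r0.length →
    pvALoop ((r0 :: rest).map
        (pvBlankRow ((List.range j).filter (fun p => !pvColHas (r0 :: rest) p)))) j fuel
      = (r0 :: rest).map
        (pvBlankRow ((List.range r0.length).filter (fun p => !pvColHas (r0 :: rest) p))) := by
  intro fuel
  induction fuel with
  | zero =>
    intro j hj
    simp only [Nat.add_zero] at hj
    subst hj
    simp [pvALoop]
  | succ fuel ih =>
    intro j hj
    have hjlt : j < r0.length := by omega
    have hlen : (((r0 :: rest).map
        (pvBlankRow ((List.range j).filter (fun p => !pvColHas (r0 :: rest) p)))).headD []).length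
        = r0.length := by
      simp [length_pvBlankRow]
    rw [pvALoop, hlen, if_pos hjlt,
      pvAFound_blank _ _ _ (fun s hs => pvEmptyFilter_mem_ne _ j s hs)]
    by_cases hc : pvColHas (r0 :: rest) j
    · rw [if_pos hc]
      have hfilter : (List.range (j + 1)).filter (fun p => !pvColHas (r0 :: rest) p)
          = (List.range j).filter (fun p => !pvColHas (r0 :: rest) p) := by
        rw [List.range_succ, List.filter_append]
        simp [hc]
      rw [← hfilter]
      exact ih (j + 1) (by omega)
    · rw [if_neg hc]
      have hblank : pvABlank ((r0 :: rest).map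
            (pvBlankRow ((List.range j).filter (fun p => !pvColHas (r0 :: rest) p)))) j
          = (r0 :: rest).map
            (pvBlankRow ((List.range (j + 1)).filter (fun p => !pvColHas (r0 :: rest) p))) := by
        rw [List.range_succ, List.filter_append]
        simp only [pvABlank, List.map_map, List.filter_cons, List.filter_nil, hc,
          Bool.not_false, if_pos trivial]
        refine List.map_congr_left (fun r _ => ?_)
        simp [Function.comp, pvBlankRow_append_singleton, PySem.List.pySetD_natCast]
      rw [hblank]
      exact ih (j + 1) (by omega)

-- membership in the inner enumerate fold
lemma pvMem_innerFold (ps : List (Int × String)) (s : PySem.Set Int) (x : Int) :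
    (x ∈ ps.foldl (fun s p => if p.2 == "#" then PySem.Set.add s p.1 else s) s)
      ↔ x ∈ s ∨ ∃ p ∈ ps, p.2 = "#" ∧ x = p.1 := by
  induction ps generalizing s with
  | nil => simp
  | cons p ps ih =>
    rw [List.foldl_cons, ih]
    by_cases h : p.2 = "#"
    · simp [h, PySem.Set.mem_add, or_assoc]
    · simp [h]

-- membership in the occupied set, generalized over the accumulator
lemma pvMem_outerFold (input : List (List String)) (s : PySem.Set Int) (x : Int) :
    (x ∈ input.foldl
        (fun s line =>
          (PySem.List.enumerate line).foldl
            (fun s p => if p.2 == "#" then PySem.Set.add s p.1 else s) s) s)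
      ↔ x ∈ s ∨ ∃ r ∈ input, ∃ p ∈ PySem.List.enumerate r, p.2 = "#" ∧ x = p.1 := by
  induction input generalizing s with
  | nil => simp
  | cons r rs ih =>
    rw [List.foldl_cons, ih, pvMem_innerFold, or_assoc]
    simp only [List.mem_cons, exists_eq_or_imp]

-- membership in the occupied set: some row has '#' at that (Int) index
lemma pvMem_occupied (input : List (List String)) (x : Int) :
    (x ∈ pvBOccupied input)
      ↔ ∃ r ∈ input, ∃ p ∈ PySem.List.enumerate r, p.2 = "#" ∧ x = p.1 := by
  rw [pvBOccupied, pvMem_outerFold]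
  simp [PySem.Set.empty]

-- under Pre_, the occupied set restricted to j < width is exactly pvColHas
lemma pvContains_occupied (input : List (List String)) (j : Nat)
    (hwide : ∀ r ∈ input, (input.headD []).length ≤ r.length)
    (hj : j < (input.headD []).length) :
    PySem.Set.contains (pvBOccupied input) (j : Int) = pvColHas input j := by
  rw [Bool.eq_iff_iff, PySem.Set.contains_iff, pvMem_occupied, pvColHas, List.any_eq_true]
  constructor
  · rintro ⟨r, hr, p, hp, h2, hx⟩
    refine ⟨r, hr, ?_⟩
    obtain ⟨k, hk, rfl⟩ := (PySem.List.mem_enumerate_iff _ _ _).mp hp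
    simp only [zero_add] at hx h2
    have hjk : j = k := by exact_mod_cast hx
    subst hjk
    rw [PySem.List.pyGetD_natCast, List.getD_eq_getElem r "" hk, h2]
    exact rfl
  · rintro ⟨r, hr, hget⟩
    have hjr : j < r.length := lt_of_lt_of_le hj (hwide r hr)
    rw [PySem.List.pyGetD_natCast, List.getD_eq_getElem r "" hjr] at hget
    refine ⟨r, hr, ((0 : Int) + (j : Int), r[j]), ?_, by simpa using hget, by simp⟩
    exact (PySem.List.mem_enumerate_iff _ _ _).mpr ⟨j, hjr, rfl⟩

-- B's per-row range fold is pvBlankRow over the filtered range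
lemma pvBBlankRow_eq (occupied : PySem.Set Int) (width : Nat) (line : List String) :
    pvBBlankRow occupied width line
      = pvBlankRow ((List.range width).filter
          (fun p => !(PySem.Set.contains occupied (p : Int)))) line := by
  unfold pvBBlankRow
  induction width with
  | zero =>
    rw [PySem.List.pyRange_one_eq_nil (by norm_num)]
    rfl
  | succ n ih =>
    have hcast : ((n + 1 : Nat) : Int) = (n : Int) + 1 := by push_cast; ring
    rw [hcast, PySem.List.pyRange_one_succ_right (by exact_mod_cast Nat.zero_le n),
      List.foldl_append, ih, List.range_succ, List.filter_append]
    by_cases hc : PySem.Set.contains occupied (n : Int)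
    · rw [List.foldl_cons, List.foldl_nil, if_neg (by simp only [hc, Bool.not_true, Bool.false_eq_true, not_false_eq_true]),
        List.filter_cons_of_neg (by simp only [hc, Bool.not_true, Bool.false_eq_true, not_false_eq_true]), List.filter_nil, List.append_nil]
    · simp only [List.foldl_cons, List.foldl_nil, hc, Bool.not_false, if_pos trivial,
        List.filter_cons, List.filter_nil, pvBlankRow_append_singleton,
        PySem.List.pySetD_natCast]

-- ===== VERDICT (by name: the statement is the Claim_ definition above) =====
theorem expand_universe_columns_spec : Claim_equal_expand_universe_columns := by
  intro input _ hpre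
  obtain ⟨hne, hwide⟩ := hpre
  obtain ⟨r0, rs, rfl⟩ := List.exists_cons_of_ne_nil hne
  show expand_universe_columns _ = expand_universe_columns_alt _
  have hstart : (r0 :: rs).map
      (pvBlankRow ((List.range 0).filter (fun p => !pvColHas (r0 :: rs) p))) = r0 :: rs := by
    rw [List.range_zero, List.filter_nil]
    exact (List.map_congr_left fun r _ => pvBlankRow_nil r).trans (List.map_id _)
  have hmain := pvKey r0 rs r0.length 0 (by omega)
  rw [hstart] at hmain
  rw [expand_universe_columns]
  simp only [List.headD_cons]
  rw [hmain]
  simp only [expand_universe_columns_alt, List.headD_cons]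
  refine List.map_congr_left fun line _ => ?_
  rw [pvBBlankRow_eq]
  congr 1
  refine List.filter_congr fun p hp => ?_
  rw [pvContains_occupied _ _ hwide (by simpa [List.headD_cons] using List.mem_range.mp hp)]
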